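-- pv_equiv track=rewrite | github.com/larbscodes/advent-of-coding | 14-parabolic-reflector-dish-2.py | tilt_east
-- ===== SOURCE A (Python) =====
-- from copy import deepcopy
--
-- def tilt_east(platform):
--     updated_platform = deepcopy(platform)
--
--     for i, row in enumerate(platform):
--         rocks_to_add = 0
--         current_col = len(row) - 1
--         next_rock_index = current_col
--         while current_col >= 0:
--             tile = row[current_col]
--             if tile == 'O':
--                 rocks_to_add += 1
--
--             if tile == '#' or current_col == 0:
--                 for j in range(next_rock_index, current_col - 1, -1):
--                     if rocks_to_add > 0:
--                         updated_platform[i][j] = 'O'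
--                         rocks_to_add -= 1
--                     elif row[j] != '#':
--                         updated_platform[i][j] = '.'
--                 next_rock_index = current_col - 1
--                 rocks_to_add = 0
--
--             current_col -= 1
--
--     return updated_platform
-- ===== SOURCE B (Python) =====
-- def tilt_east(platform):
--     def pack(length, rocks):
--         return ['.'] * (length - rocks) + ['O'] * rocks
--
--     result = []
--     for row in platform:
--         new_row = []
--         run_len = 0
--         run_rocks = 0
--         for tile in row:
--             if tile == '#':
--                 new_row += pack(run_len, run_rocks)
--                 new_row.append('#')
--                 run_len = 0
--                 run_rocks = 0
--             else:
--                 run_len += 1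
--                 if tile == 'O':
--                     run_rocks += 1
--         result.append(new_row + pack(run_len, run_rocks))
--     return result
-- ===== Notes on version B (the rewrite author's own statement) =====
-- stated objective: simpler
-- what changed: A scans each row right-to-left with index bookkeeping (next_rock_index, pending rock counter, an inner index-range write-back loop mutating a deep copy); B makes one left-to-right pass per row keeping only the current run's length and rock count, emitting each wall-delimited run as dots followed by rocks when it closes.
import Mathlib
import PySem

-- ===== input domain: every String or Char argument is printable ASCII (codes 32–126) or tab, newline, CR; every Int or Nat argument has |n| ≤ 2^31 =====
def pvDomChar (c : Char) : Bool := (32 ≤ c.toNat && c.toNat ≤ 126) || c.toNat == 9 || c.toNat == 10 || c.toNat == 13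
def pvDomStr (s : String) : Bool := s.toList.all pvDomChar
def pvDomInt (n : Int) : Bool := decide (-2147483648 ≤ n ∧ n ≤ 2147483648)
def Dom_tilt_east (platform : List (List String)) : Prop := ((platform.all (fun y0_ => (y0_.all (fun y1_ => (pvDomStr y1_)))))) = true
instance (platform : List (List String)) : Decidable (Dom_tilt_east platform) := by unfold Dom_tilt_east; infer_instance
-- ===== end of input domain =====

-- B replaces A's right-to-left index bookkeeping and write-back loop by a single
-- left-to-right pass per row that counts each wall-delimited run and emits it as
-- dots followed by rocks (objective: simpler).

-- ===== PORT A =====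
-- A's inner "for j in range(next_rock_index, current_col - 1, -1)" write-back loop
def tiltFillA (row : List String) (upd : List String) (nri stop : Int) (rocks : Int) : List String :=
  ((PySem.List.pyRange nri stop (-1)).foldl
    (fun (st : List String × Int) j =>
      if st.2 > 0 then (PySem.List.pySetD st.1 j "O", st.2 - 1)
      else if PySem.List.pyGetD row j "" ≠ "#" then (PySem.List.pySetD st.1 j ".", st.2)
      else st)
    (upd, rocks)).1

-- A's "while current_col >= 0" loop; fuel = current_col + 1
def tiltRowA (row : List String) (upd : List String) (rocks : Int) (nri : Int) : Nat → List String
  | 0 => upd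
  | c + 1 =>
    let tile := PySem.List.pyGetD row (c : Int) ""
    let rocks' := if tile = "O" then rocks + 1 else rocks
    if tile = "#" ∨ c = 0 then
      tiltRowA row (tiltFillA row upd nri ((c : Int) - 1) rocks') 0 ((c : Int) - 1) c
    else
      tiltRowA row upd rocks' nri c

def tilt_east (platform : List (List String)) : List (List String) :=
  platform.map (fun row => tiltRowA row row 0 ((row.length : Int) - 1) row.length)

-- ===== PORT B =====
def packB (len rocks : Nat) : List String :=
  List.replicate (len - rocks) "." ++ List.replicate rocks "O"

def stepB (st : List String × Nat × Nat) (tile : String) : List String × Nat × Nat :=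
  if tile = "#" then (st.1 ++ packB st.2.1 st.2.2 ++ ["#"], 0, 0)
  else (st.1, st.2.1 + 1, if tile = "O" then st.2.2 + 1 else st.2.2)

def tiltRowB (row : List String) : List String :=
  let st := row.foldl stepB ([], 0, 0)
  st.1 ++ packB st.2.1 st.2.2

def tilt_east_alt (platform : List (List String)) : List (List String) :=
  platform.map tiltRowB

-- ===== PRECONDITION & SPEC =====
def Spec_tilt_east (platform : List (List String)) (out : List (List String)) : Prop := out = tilt_east_alt platform
instance (platform : List (List String)) (out : List (List String)) : Decidable (Spec_tilt_east platform out) := by unfold Spec_tilt_east; infer_instance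

-- ===== CLAIM (what is proved, stated in full; the proofs are below) =====
def Claim_equal_tilt_east : Prop := ∀ (platform : List (List String)), Dom_tilt_east platform → Spec_tilt_east platform (tilt_east platform)

-- ===== LEMMAS AND PROOFS =====

lemma set_take_last (row : List String) (a : Nat) (tail : List String) (v : String)
    (ha : a < row.length) :
    (row.take (a + 1) ++ tail).set a v = row.take a ++ v :: tail := by
  have h1 : row.take (a + 1) = row.take a ++ [row[a]] := by
    rw [List.take_add_one]; simp [List.getElem?_eq_getElem ha]
  rw [h1, List.append_assoc, List.set_append_right a v (by simp)]
  simp [Nat.min_eq_left (Nat.le_of_lt ha)]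

lemma fill_nil (row upd : List String) (a stop rocks : Int) (h : a ≤ stop) :
    tiltFillA row upd a stop rocks = upd := by
  unfold tiltFillA
  rw [PySem.List.pyRange_neg_one_eq_nil h]
  rfl

lemma fill_cons (row upd : List String) (a stop rocks : Int) (h : stop < a) :
    tiltFillA row upd a stop rocks =
      if rocks > 0 then tiltFillA row (PySem.List.pySetD upd a "O") (a - 1) stop (rocks - 1)
      else if PySem.List.pyGetD row a "" ≠ "#" then
        tiltFillA row (PySem.List.pySetD upd a ".") (a - 1) stop rocks
      else tiltFillA row upd (a - 1) stop rocks := by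
  unfold tiltFillA
  rw [PySem.List.pyRange_neg_one_cons h, List.foldl_cons]
  split_ifs <;> rfl

-- filling cells a,a-1,…,b when none of them holds a wall: rocks east, dots west
lemma fill_nohash : ∀ (len a b rocks : Nat) (tail row : List String),
    a + 1 = b + len → a < row.length →
    (∀ k, b ≤ k → k ≤ a → row.getD k "" ≠ "#") → rocks ≤ len →
    tiltFillA row (row.take (a + 1) ++ tail) (a : Int) ((b : Int) - 1) (rocks : Int)
      = row.take b ++ List.replicate (len - rocks) "." ++ List.replicate rocks "O" ++ tail := by
  intro len
  induction len with
  | zero =>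
    intro a b rocks tail row hab ha hk hr
    have hb : b = a + 1 := by omega
    have hr0 : rocks = 0 := by omega
    subst hb hr0
    rw [fill_nil _ _ _ _ _ (by omega)]
    simp
  | succ len ih =>
    intro a b rocks tail row hab ha hk hr
    have hba : b ≤ a := by omega
    have hne : row.getD a "" ≠ "#" := hk a hba le_rfl
    rw [fill_cons _ _ _ _ _ (by omega)]
    rcases Nat.eq_zero_or_pos rocks with hr0 | hrpos
    · subst hr0
      rw [if_neg (by omega), if_pos (by simpa using hne),
          PySem.List.pySetD_natCast, set_take_last row a tail "." ha]
      rcases Nat.lt_or_ge b a with hlt | hge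
      · rw [show (a : Int) - 1 = ((a - 1 : Nat) : Int) by omega,
            show row.take a = row.take ((a - 1) + 1) by congr 1; omega,
            ih (a - 1) b 0 ("." :: tail) row (by omega) (by omega)
              (fun k hbk hka => hk k hbk (by omega)) (by omega)]
        simp [List.replicate_succ', show len + 1 - 0 = (len - 0) + 1 by omega]
      · have hba' : b = a := by omega
        have hlen : len = 0 := by omega
        subst hba' hlen
        rw [fill_nil _ _ _ _ _ (by omega)]
        simp
    · obtain ⟨r, rfl⟩ : ∃ r, rocks = r + 1 := ⟨rocks - 1, by omega⟩
      rw [if_pos (by exact_mod_cast Nat.succ_pos r),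
          PySem.List.pySetD_natCast, set_take_last row a tail "O" ha]
      rcases Nat.lt_or_ge b a with hlt | hge
      · rw [show (a : Int) - 1 = ((a - 1 : Nat) : Int) by omega,
            show row.take a = row.take ((a - 1) + 1) by congr 1; omega,
            show ((r + 1 : Nat) : Int) - 1 = ((r : Nat) : Int) by omega,
            ih (a - 1) b r ("O" :: tail) row (by omega) (by omega)
              (fun k hbk hka => hk k hbk (by omega)) (by omega)]
        have h1 : List.replicate r ("O" : String) ++ "O" :: tail
            = List.replicate (r + 1) "O" ++ tail := by
          simp [List.replicate_succ']
        have h2 : len - r = len + 1 - (r + 1) := by omega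
        simp only [List.append_assoc, h1, h2]
      · have hba' : b = a := by omega
        have hlen : len = 0 := by omega
        subst hba' hlen
        have hr1 : r = 0 := by omega
        subst hr1
        rw [fill_nil _ _ _ _ _ (by omega)]
        simp

-- filling cells a,a-1,…,b when the wall sits exactly at b (it is left untouched)
lemma fill_hash : ∀ (len a b rocks : Nat) (tail row : List String),
    a = b + len → a < row.length → row.getD b "" = "#" →
    (∀ k, b < k → k ≤ a → row.getD k "" ≠ "#") → rocks ≤ len →
    tiltFillA row (row.take (a + 1) ++ tail) (a : Int) ((b : Int) - 1) (rocks : Int)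
      = row.take b ++ "#" :: (List.replicate (len - rocks) "." ++ List.replicate rocks "O" ++ tail) := by
  intro len
  induction len with
  | zero =>
    intro a b rocks tail row hab ha hh hk hr
    have hb : b = a := by omega
    have hr0 : rocks = 0 := by omega
    subst hb hr0
    rw [fill_cons _ _ _ _ _ (by omega), if_neg (by omega),
        if_neg (by simpa using hh), fill_nil _ _ _ _ _ (by omega)]
    have h1 : row.take (b + 1) = row.take b ++ [row[b]] := by
      rw [List.take_add_one]; simp [List.getElem?_eq_getElem ha]
    have h2 : row[b] = "#" := by
      have := List.getD_eq_getElem row "" ha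
      rw [← this, hh]
    simp [h1, h2]
  | succ len ih =>
    intro a b rocks tail row hab ha hh hk hr
    have hba : b < a := by omega
    have hne : row.getD a "" ≠ "#" := hk a hba le_rfl
    rw [fill_cons _ _ _ _ _ (by omega)]
    rcases Nat.eq_zero_or_pos rocks with hr0 | hrpos
    · subst hr0
      rw [if_neg (by omega), if_pos (by simpa using hne),
          PySem.List.pySetD_natCast, set_take_last row a tail "." ha]
      rw [show (a : Int) - 1 = ((a - 1 : Nat) : Int) by omega,
          show row.take a = row.take ((a - 1) + 1) by congr 1; omega,
          ih (a - 1) b 0 ("." :: tail) row (by omega) (by omega) hh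
            (fun k hbk hka => hk k hbk (by omega)) (by omega)]
      simp [List.replicate_succ', show len + 1 - 0 = (len - 0) + 1 by omega]
    · obtain ⟨r, rfl⟩ : ∃ r, rocks = r + 1 := ⟨rocks - 1, by omega⟩
      rw [if_pos (by exact_mod_cast Nat.succ_pos r),
          PySem.List.pySetD_natCast, set_take_last row a tail "O" ha]
      rw [show (a : Int) - 1 = ((a - 1 : Nat) : Int) by omega,
          show row.take a = row.take ((a - 1) + 1) by congr 1; omega,
          show ((r + 1 : Nat) : Int) - 1 = ((r : Nat) : Int) by omega,
          ih (a - 1) b r ("O" :: tail) row (by omega) (by omega) hh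
            (fun k hbk hka => hk k hbk (by omega)) (by omega)]
      have h1 : List.replicate r ("O" : String) ++ "O" :: tail
          = List.replicate (r + 1) "O" ++ tail := by
        simp [List.replicate_succ']
      have h2 : len - r = len + 1 - (r + 1) := by omega
      simp only [List.append_assoc, h1, h2]

-- B's fold from ([],0,0), with the trailing run extended by e extra cells holding r extra rocks
def EB (xs : List String) (e r : Nat) : List String :=
  let s := xs.foldl stepB ([], 0, 0)
  s.1 ++ packB (s.2.1 + e) (s.2.2 + r)

lemma EB_append_hash (ys : List String) (e r : Nat) :
    EB (ys ++ ["#"]) e r = EB ys 0 0 ++ "#" :: packB e r := by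
  simp [EB, List.foldl_append, stepB, packB]

lemma EB_append_ne (ys : List String) (t : String) (e r : Nat) (ht : t ≠ "#") :
    EB (ys ++ [t]) e r = EB ys (e + 1) (if t = "O" then r + 1 else r) := by
  by_cases hO : t = "O" <;>
    simp [EB, List.foldl_append, stepB, ht, hO, Nat.add_assoc, Nat.add_comm]

lemma EB_single_hash (e r : Nat) : EB ["#"] e r = "#" :: packB e r := by
  simp [EB, stepB, packB]

lemma EB_single_ne (t : String) (e r : Nat) (ht : t ≠ "#") :
    EB [t] e r = packB (e + 1) (if t = "O" then r + 1 else r) := by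
  by_cases hO : t = "O" <;> simp [EB, stepB, packB, ht, hO, Nat.add_comm]

lemma take_succ_getElem (row : List String) (c : Nat) (hc : c < row.length) :
    row.take (c + 1) = row.take c ++ [row[c]] := by
  rw [List.take_add_one]; simp [List.getElem?_eq_getElem hc]

lemma tiltRowA_succ (row upd : List String) (rocks nri : Int) (c : Nat) :
    tiltRowA row upd rocks nri (c + 1) =
      if PySem.List.pyGetD row (c : Int) "" = "#" ∨ c = 0 then
        tiltRowA row
          (tiltFillA row upd nri ((c : Int) - 1)
            (if PySem.List.pyGetD row (c : Int) "" = "O" then rocks + 1 else rocks))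
          0 ((c : Int) - 1) c
      else
        tiltRowA row upd
          (if PySem.List.pyGetD row (c : Int) "" = "O" then rocks + 1 else rocks) nri c := rfl

-- loop invariant of A's while loop: columns above nri are already solved (they sit in tail),
-- cells (c, nri] hold no wall, rocks counts the 'O's among them
lemma rowA_spec : ∀ (c : Nat) (row : List String) (nri rocks : Nat) (tail : List String),
    c ≤ nri → nri < row.length →
    (∀ k, c < k → k ≤ nri → row.getD k "" ≠ "#") →
    rocks = ((row.drop (c + 1)).take (nri - c)).count "O" →
    tiltRowA row (row.take (nri + 1) ++ tail) (rocks : Int) (nri : Int) (c + 1)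
      = EB (row.take (c + 1)) (nri - c) rocks ++ tail := by
  intro c
  induction c with
  | zero =>
    intro row nri rocks tail hc hn hk hrocks
    have hrle : rocks ≤ nri := by
      rw [hrocks]
      calc ((row.drop 1).take nri).count "O" ≤ ((row.drop 1).take nri).length :=
            List.count_le_length
        _ ≤ nri := by simp
    have hlen : 0 < row.length := by omega
    have hgd : row.getD 0 "" = row[0] := List.getD_eq_getElem row "" hlen
    have htake1 : row.take (0 + 1) = [row[0]] := by
      rw [take_succ_getElem row 0 hlen]; simp
    simp only [tiltRowA, PySem.List.pyGetD_natCast, or_true, if_true, Nat.sub_zero]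
    by_cases hh : row.getD 0 "" = "#"
    · rw [if_neg (by rw [hh]; decide), fill_hash nri nri 0 rocks tail row (by omega) hn hh
        (fun k h1 h2 => hk k h1 h2) hrle]
      rw [htake1, ← hgd, hh, EB_single_hash]
      simp [packB]
    · rw [show (if row.getD 0 "" = "O" then (rocks : Int) + 1 else (rocks : Int))
            = ((if row.getD 0 "" = "O" then rocks + 1 else rocks : Nat) : Int) by
          split_ifs <;> simp]
      rw [fill_nohash (nri + 1) nri 0 _ tail row (by omega) hn
        (fun k h1 h2 => by rcases Nat.eq_zero_or_pos k with h0 | h0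
                           · subst h0; exact hh
                           · exact hk k h0 h2)
        (by split_ifs <;> omega)]
      rw [htake1, EB_single_ne _ _ _ (by rw [← hgd]; exact hh), ← hgd]
      simp [packB]
  | succ c ih =>
    intro row nri rocks tail hc hn hk hrocks
    have hclen : c + 1 < row.length := by omega
    have hgd : row.getD (c + 1) "" = row[c + 1] := List.getD_eq_getElem row "" hclen
    have hrle : rocks ≤ nri - (c + 1) := by
      rw [hrocks]
      calc ((row.drop (c + 1 + 1)).take (nri - (c + 1))).count "O"
          ≤ ((row.drop (c + 1 + 1)).take (nri - (c + 1))).length := List.count_le_length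
        _ ≤ nri - (c + 1) := by simp
    rw [tiltRowA_succ, PySem.List.pyGetD_natCast]
    by_cases hh : row.getD (c + 1) "" = "#"
    · rw [if_pos (Or.inl hh), hh, if_neg (show ¬("#" : String) = "O" by decide)]
      rw [fill_hash (nri - (c + 1)) nri (c + 1) rocks tail row (by omega) hn hh
        (fun k h1 h2 => hk k (by omega) h2) hrle]
      rw [show (((c + 1 : Nat) : Int) - 1) = ((c : Nat) : Int) by omega,
          show (0 : Int) = ((0 : Nat) : Int) by norm_num,
          ih row c 0
            ("#" :: (List.replicate (nri - (c + 1) - rocks) "." ++ List.replicate rocks "O" ++ tail))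
            le_rfl (by omega) (fun k h1 h2 => by omega) (by simp)]
      rw [take_succ_getElem row (c + 1) hclen, ← hgd, hh, EB_append_hash]
      simp [packB]
    · rw [if_neg (by rw [not_or]; exact ⟨hh, by omega⟩)]
      rw [show (if row.getD (c + 1) "" = "O" then (rocks : Int) + 1 else (rocks : Int))
            = ((if row.getD (c + 1) "" = "O" then rocks + 1 else rocks : Nat) : Int) by
          split_ifs <;> simp]
      rw [ih row nri _ tail (by omega) hn
        (fun k h1 h2 => by
          by_cases h0 : k = c + 1
          · subst h0; exact hh
          · exact hk k (by omega) h2)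
        (by rw [hrocks, List.drop_eq_getElem_cons hclen,
                show nri - c = (nri - (c + 1)) + 1 by omega, List.take_succ_cons,
                List.count_cons, hgd]
            by_cases hO : row[c + 1] = "O" <;> simp [hO])]
      rw [take_succ_getElem row (c + 1) hclen,
          EB_append_ne _ _ _ _ (by rw [← hgd]; exact hh),
          show nri - (c + 1) + 1 = nri - c by omega, ← hgd]

lemma tiltRowB_eq_EB (row : List String) : tiltRowB row = EB row 0 0 := by
  simp [tiltRowB, EB]

lemma rowA_eq_rowB (row : List String) :
    tiltRowA row row 0 ((row.length : Int) - 1) row.length = tiltRowB row := by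
  cases row with
  | nil => simp [tiltRowA, tiltRowB, packB]
  | cons x xs =>
    have h := rowA_spec xs.length (x :: xs) xs.length 0 [] le_rfl (by simp)
      (fun k h1 h2 => by omega) (by simp)
    have h2 : (x :: xs).take (xs.length + 1) ++ ([] : List String) = x :: xs := by simp
    rw [h2, Nat.sub_self, List.append_nil] at h
    have h3 : EB ((x :: xs).take (xs.length + 1)) 0 0 = tiltRowB (x :: xs) := by
      rw [tiltRowB_eq_EB]
      congr 1
      simp
    rw [h3] at h
    simp only [List.length_cons]
    rw [show ((xs.length + 1 : Nat) : Int) - 1 = ((xs.length : Nat) : Int) by omega,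
        show (0 : Int) = ((0 : Nat) : Int) by norm_num]
    exact h

-- ===== VERDICT (by name: the statement is the Claim_ definition above) =====
theorem tilt_east_spec : Claim_equal_tilt_east := by
  intro platform _dom
  unfold Spec_tilt_east tilt_east tilt_east_alt
  exact List.map_congr_left (fun row _ => rowA_eq_rowB row)
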